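-- pv_equiv track=rewrite | github.com/pypi-data/pypi-mirror-399 | packages/mind-mcp/mind_mcp-0.2.0.tar.gz/mind_mcp-0.2.0/runtime/doctor_checks_naming.py | is_pascal_case_with_underscores
-- ===== SOURCE A (Python) =====
-- def is_pascal_case_with_underscores(name: str) -> bool:
--     """Check if a name is PascalCase (allowing acronyms) with underscores."""
--     # Each part separated by underscore must start with uppercase
--     parts = name.split('_')
--     for part in parts:
--         if not part:
--             return False
--         # Part must start with uppercase letter or number (e.g. 2D)
--         if not (part[0].isupper() or part[0].isdigit()):
--             return False
--     return True
-- ===== SOURCE B (Python) =====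
-- def is_pascal_case_with_underscores(name: str) -> bool:
--     """Check if a name is PascalCase (allowing acronyms) with underscores."""
--     at_part_start = True
--     for ch in name:
--         if ch == '_':
--             if at_part_start:
--                 return False
--             at_part_start = True
--         elif at_part_start:
--             if not (ch.isupper() or ch.isdigit()):
--                 return False
--             at_part_start = False
--     return not at_part_start
-- ===== Notes on version B (the rewrite author's own statement) =====
-- stated objective: simpler
-- what changed: Replaced the split-on-underscore-then-loop-over-parts approach with a single character-by-character scan keeping one boolean flag for whether the scan is at the start of a part, so no intermediate list of parts is built.
import Mathlib
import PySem

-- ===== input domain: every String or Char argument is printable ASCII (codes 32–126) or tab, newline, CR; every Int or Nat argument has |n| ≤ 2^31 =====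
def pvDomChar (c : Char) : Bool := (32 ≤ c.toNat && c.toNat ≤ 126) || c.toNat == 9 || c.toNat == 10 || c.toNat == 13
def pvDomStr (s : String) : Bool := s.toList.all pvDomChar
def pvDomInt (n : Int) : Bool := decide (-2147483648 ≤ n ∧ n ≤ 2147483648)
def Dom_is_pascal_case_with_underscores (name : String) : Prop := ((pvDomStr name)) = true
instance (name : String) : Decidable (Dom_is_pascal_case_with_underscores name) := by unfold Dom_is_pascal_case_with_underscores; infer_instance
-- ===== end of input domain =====

-- B replaces A's split('_')-then-loop-over-parts by a single character scan keeping
-- one boolean "at the start of a part"; objective: simpler (no intermediate parts list).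

-- ===== PORT A =====
-- loop over the parts of name.split('_'); early return False becomes returning false
def pvGoA : List (List Char) → Bool
  | [] => true
  | part :: rest =>
    -- 'if not part: return False' and 'part[0]' merged through pyGet? (none exactly when part is empty)
    match PySem.List.pyGet? part 0 with
    | none => false
    | some c =>
      if !(PySem.Chars.isupper c || PySem.Chars.isdigit c) then false
      else pvGoA rest

def is_pascal_case_with_underscores (name : String) : Bool :=
  pvGoA (PySem.Chars.splitOn name.toList ['_'])

-- ===== PORT B =====
-- single scan: state = at_part_start
def pvGoB : List Char → Bool → Bool
  | [], st => !st
  | c :: rest, st =>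
    if c = '_' then
      if st then false else pvGoB rest true
    else if st then
      if PySem.Chars.isupper c || PySem.Chars.isdigit c then pvGoB rest false else false
    else pvGoB rest st

def is_pascal_case_with_underscores_alt (name : String) : Bool :=
  pvGoB name.toList true

-- ===== PRECONDITION & SPEC =====
def Spec_is_pascal_case_with_underscores (name : String) (out : Bool) : Prop := out = is_pascal_case_with_underscores_alt name
instance (name : String) (out : Bool) : Decidable (Spec_is_pascal_case_with_underscores name out) := by unfold Spec_is_pascal_case_with_underscores; infer_instance

-- ===== CLAIM (what is proved, stated in full; the proofs are below) =====
def Claim_equal_is_pascal_case_with_underscores : Prop := ∀ (name : String), Dom_is_pascal_case_with_underscores name → Spec_is_pascal_case_with_underscores name (is_pascal_case_with_underscores name)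

-- ===== LEMMAS AND PROOFS =====

-- fuel-free rendering of splitOn on separator ['_']
def pvSub : List Char → List Char → List (List Char)
  | [], cur => [cur.reverse]
  | c :: rest, cur =>
    if c = '_' then cur.reverse :: pvSub rest []
    else pvSub rest (c :: cur)

def pvPartOk : List Char → Bool
  | [] => false
  | c :: _ => PySem.Chars.isupper c || PySem.Chars.isdigit c

theorem pvGo_eq (l : List Char) : ∀ (fuel : Nat) (cur : List Char) (acc : List (List Char)),
    l.length ≤ fuel →
    PySem.Chars.splitOn.go ['_'] fuel l cur acc = acc.reverse ++ pvSub l cur := by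
  induction l with
  | nil =>
    intro fuel cur acc _
    cases fuel <;> simp [PySem.Chars.splitOn.go, pvSub]
  | cons c rest ih =>
    intro fuel cur acc hf
    cases fuel with
    | zero => simp at hf
    | succ n =>
      simp only [PySem.Chars.splitOn.go]
      by_cases hc : c = '_'
      · subst hc
        have hpre : List.isPrefixOf ['_'] ('_' :: rest) = true := by
          simp [List.isPrefixOf]
        simp only [hpre, List.drop, List.length_cons, List.length_nil] at *
        rw [if_pos trivial, ih n [] (cur.reverse :: acc) (by omega)]
        simp [pvSub]
      · have hpre : List.isPrefixOf ['_'] (c :: rest) = false := by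
          simp [List.isPrefixOf]
          intro h; exact absurd h.symm hc
        simp only [hpre, Bool.false_eq_true, if_false]
        rw [ih n (c :: cur) acc (by simpa using Nat.le_of_succ_le_succ hf)]
        simp [pvSub, hc]

theorem pvSplitOn_eq (l : List Char) : PySem.Chars.splitOn l ['_'] = pvSub l [] := by
  have := pvGo_eq l (l.length + 1) [] [] (by omega)
  simpa [PySem.Chars.splitOn] using this

theorem pvGoA_all (ps : List (List Char)) : pvGoA ps = ps.all pvPartOk := by
  induction ps with
  | nil => rfl
  | cons p rest ih =>
    cases p with
    | nil => simp [pvGoA, pvPartOk, PySem.List.pyGet?]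
    | cons c cs =>
      simp only [pvGoA, PySem.List.pyGet?_zero_cons, List.all_cons, pvPartOk]
      by_cases h : (PySem.Chars.isupper c || PySem.Chars.isdigit c) = true <;>
        simp [h, ih]

theorem pvPartOk_append (xs ys : List Char) (h : xs ≠ []) :
    pvPartOk (xs ++ ys) = pvPartOk xs := by
  cases xs with
  | nil => exact absurd rfl h
  | cons a as => simp [pvPartOk]

theorem pvNotOk (l : List Char) : ∀ cur, cur ≠ [] → pvPartOk cur.reverse = false →
    (pvSub l cur).all pvPartOk = false := by
  induction l with
  | nil => intro cur _ h; simp [pvSub, h]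
  | cons c rest ih =>
    intro cur hne h
    by_cases hc : c = '_'
    · subst hc; simp [pvSub, h]
    · simp only [pvSub, if_neg hc]
      apply ih (c :: cur) (by simp)
      have : (c :: cur).reverse = cur.reverse ++ [c] := by simp
      rw [this, pvPartOk_append _ _ (by simpa using hne), h]

theorem pvMain (l : List Char) :
    (pvGoB l true = (pvSub l []).all pvPartOk) ∧
    (∀ cur, cur ≠ [] → pvPartOk cur.reverse = true →
      pvGoB l false = (pvSub l cur).all pvPartOk) := by
  induction l with
  | nil =>
    refine ⟨by simp [pvGoB, pvSub, pvPartOk], ?_⟩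
    intro cur _ h
    simp [pvGoB, pvSub, h]
  | cons c rest ih =>
    obtain ⟨ih1, ih2⟩ := ih
    by_cases hc : c = '_'
    · subst hc
      refine ⟨by simp [pvGoB, pvSub, pvPartOk], ?_⟩
      intro cur hne h
      simp [pvGoB, pvSub, h, ih1]
    · constructor
      · by_cases hv : (PySem.Chars.isupper c || PySem.Chars.isdigit c) = true
        · have := ih2 [c] (by simp) (by simpa [pvPartOk] using hv)
          simp [pvGoB, pvSub, hc, hv, this]
        · have hfalse := pvNotOk rest [c] (by simp)
            (by simp [pvPartOk] at hv ⊢; exact hv)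
          simp [pvGoB, pvSub, hc, hv, hfalse]
      · intro cur hne h
        have h' : pvPartOk (c :: cur).reverse = true := by
          have : (c :: cur).reverse = cur.reverse ++ [c] := by simp
          rw [this, pvPartOk_append _ _ (by simpa using hne)]; exact h
        have := ih2 (c :: cur) (by simp) h'
        simp [pvGoB, pvSub, hc, this]

-- ===== VERDICT (by name: the statement is the Claim_ definition above) =====
theorem is_pascal_case_with_underscores_spec : Claim_equal_is_pascal_case_with_underscores := by
  intro name _
  unfold Spec_is_pascal_case_with_underscores
  unfold is_pascal_case_with_underscores is_pascal_case_with_underscores_alt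
  rw [pvSplitOn_eq, pvGoA_all, (pvMain name.toList).1]
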